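-- pv_equiv track=rewrite | github.com/uttammane1/DSA | Sliding window/diversity.py | max_families_within_diversity
-- ===== SOURCE A (Python) =====
-- def max_families_within_diversity(n, k, incomes):
--     incomes.sort()
--     left = 0
--     max_families = 0
--
--     for right in range(n):
--         while incomes[right] - incomes[left] > k:
--             left += 1
--         max_families = max(max_families, right - left + 1)
--
--     return max_families
-- ===== SOURCE B (Python) =====
-- def max_families_within_diversity(n, k, incomes):
--     incomes.sort()
--     best = 0
--     for right in range(n):
--         target = incomes[right] - k
--         lo, hi = 0, len(incomes)
--         while lo < hi:
--             mid = (lo + hi) // 2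
--             if incomes[mid] < target:
--                 lo = mid + 1
--             else:
--                 hi = mid
--         if right - lo + 1 > best:
--             best = right - lo + 1
--     return best
-- ===== Notes on version B (the rewrite author's own statement) =====
-- stated objective: alternative
-- what changed: Replaces the stateful two-pointer while-loop (a running left index carried across iterations) with a stateless binary search per right index that locates the window's left boundary from scratch.
import Mathlib
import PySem

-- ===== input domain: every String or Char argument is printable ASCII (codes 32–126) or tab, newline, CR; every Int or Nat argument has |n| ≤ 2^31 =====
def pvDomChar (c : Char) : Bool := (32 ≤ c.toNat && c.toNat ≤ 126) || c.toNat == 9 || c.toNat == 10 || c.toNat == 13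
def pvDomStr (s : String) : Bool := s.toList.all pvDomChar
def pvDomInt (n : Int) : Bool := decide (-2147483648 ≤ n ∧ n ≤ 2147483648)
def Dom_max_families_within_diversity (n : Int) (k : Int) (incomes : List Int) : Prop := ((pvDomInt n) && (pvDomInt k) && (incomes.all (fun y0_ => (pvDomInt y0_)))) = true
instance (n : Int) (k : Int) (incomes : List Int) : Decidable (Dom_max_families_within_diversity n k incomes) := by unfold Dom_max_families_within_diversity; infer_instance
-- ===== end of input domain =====

-- B replaces A's stateful two-pointer scan by a per-element binary search for the window's
-- left boundary (objective: alternative). A sorts `incomes` in place; B performs the same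
-- mutation, and the equivalence proved here is about the return value.
-- Index accesses use pyGetD with default 0; inputs where Python would raise IndexError are
-- exactly the ones excluded by Pre_ below.

-- ===== PORT A =====
-- the `while incomes[right] - incomes[left] > k: left += 1` loop; fuel bounds the steps
def pvAWhile (xs : List Int) (k : Int) (r : Int) (left : Nat) (fuel : Nat) : Nat :=
  match fuel with
  | 0 => left
  | fuel + 1 =>
    if PySem.List.pyGetD xs r 0 - PySem.List.pyGetD xs (left : Int) 0 > k then
      pvAWhile xs k r (left + 1) fuel
    else left

def max_families_within_diversity (n : Int) (k : Int) (incomes : List Int) : Int :=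
  let xs := PySem.List.sorted incomes (fun x => x) false
  let res := (PySem.List.pyRange 0 n 1).foldl
    (fun (st : Nat × Int) r =>
      let left := pvAWhile xs k r st.1 (xs.length + 1)
      (left, max st.2 (r - (left : Int) + 1)))
    (0, 0)
  res.2

-- ===== PORT B =====
-- hand-written binary search of Source B: while lo < hi: mid=(lo+hi)//2; …
def pvBSearch (xs : List Int) (t : Int) (lo hi : Int) (fuel : Nat) : Int :=
  match fuel with
  | 0 => lo
  | fuel + 1 =>
    if lo < hi then
      let mid := PySem.Int.floordiv (lo + hi) 2
      if PySem.List.pyGetD xs mid 0 < t then pvBSearch xs t (mid + 1) hi fuel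
      else pvBSearch xs t lo mid fuel
    else lo

def max_families_within_diversity_alt (n : Int) (k : Int) (incomes : List Int) : Int :=
  let xs := PySem.List.sorted incomes (fun x => x) false
  (PySem.List.pyRange 0 n 1).foldl
    (fun best r =>
      let target := PySem.List.pyGetD xs r 0 - k
      let lo := pvBSearch xs target 0 (xs.length : Int) (xs.length + 1)
      if r - lo + 1 > best then r - lo + 1 else best)
    0

-- ===== PRECONDITION & SPEC =====
-- Pre_ is exactly the set of inputs where A returns: n ≤ len(incomes) (else IndexError at
-- incomes[right]) and, for n > 0, at least n incomes are ≤ k + max(incomes) — otherwise the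
-- while loop runs left past the end of the list (IndexError, possible when k < 0).
def Pre_max_families_within_diversity (n : Int) (k : Int) (incomes : List Int) : Prop :=
  n ≤ (incomes.length : Int) ∧
    (n ≤ 0 ∨
      n ≤ (incomes.countP (fun v => v ≤ k + incomes.foldl max (incomes.headD 0)) : Int))
instance (n : Int) (k : Int) (incomes : List Int) : Decidable (Pre_max_families_within_diversity n k incomes) := by unfold Pre_max_families_within_diversity; infer_instance

def pvWitness_max_families_within_diversity : Int × Int × List Int := (3, 5, [1, 10, 2])

def Spec_max_families_within_diversity (n : Int) (k : Int) (incomes : List Int) (out : Int) : Prop := out = max_families_within_diversity_alt n k incomes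
instance (n : Int) (k : Int) (incomes : List Int) (out : Int) : Decidable (Spec_max_families_within_diversity n k incomes out) := by unfold Spec_max_families_within_diversity; infer_instance

-- ===== CLAIM (what is proved, stated in full; the proofs are below) =====
def Claim_equal_max_families_within_diversity : Prop := ∀ (n : Int) (k : Int) (incomes : List Int), Dom_max_families_within_diversity n k incomes → Pre_max_families_within_diversity n k incomes → Spec_max_families_within_diversity n k incomes (max_families_within_diversity n k incomes)

-- ===== LEMMAS AND PROOFS =====

theorem pv_get (xs : List Int) (j : Nat) (hj : j < xs.length) :
    PySem.List.pyGetD xs (j : Int) 0 = xs[j] := by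
  simp [PySem.List.pyGetD_natCast, List.getD_eq_getElem?_getD, hj]

-- In a sorted list, the elements below a threshold are exactly the first countP of them.
theorem pv_countP_char (xs : List Int) (t : Int) (hs : xs.Pairwise (· ≤ ·))
    (j : Nat) (hj : j < xs.length) :
    xs[j] < t ↔ j < xs.countP (fun v => v < t) := by
  induction xs generalizing j with
  | nil => simp at hj
  | cons x xs ih =>
    rcases List.pairwise_cons.mp hs with ⟨hx, hs'⟩
    by_cases hxt : x < t
    · cases j with
      | zero =>
        simp [hxt]
      | succ j =>
        have hj' : j < xs.length := by simpa using hj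
        have := ih hs' j hj'
        simp [hxt, List.getElem_cons_succ] at *
        omega
    · have hz : xs.countP (fun v => v < t) = 0 := by
        rw [List.countP_eq_zero]
        intro v hv
        have := hx v hv
        simp only [decide_eq_true_eq]
        omega
      cases j with
      | zero => simp [hxt, hz]
      | succ j =>
        have hj' : j < xs.length := by simpa using hj
        have hge : t ≤ xs[j] := by
          have := hx xs[j] (List.getElem_mem hj')
          omega
        simp [hxt, hz, List.getElem_cons_succ]
        omega

theorem pv_foldl_max_mem (xs : List Int) (a : Int) :
    List.foldl max a xs = a ∨ List.foldl max a xs ∈ xs := by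
  induction xs generalizing a with
  | nil => simp
  | cons x xs ih =>
    simp only [List.foldl_cons]
    rcases ih (max a x) with h | h
    · rcases max_cases a x with ⟨h1, _⟩ | ⟨h1, _⟩
      · left; omega
      · right; rw [h, h1]; exact List.mem_cons_self
    · right; exact List.mem_cons_of_mem _ h

-- A's while loop lands exactly on countP (· < incomes[right] - k).
theorem pv_aWhile_eq (xs : List Int) (k r : Int) (hs : xs.Pairwise (· ≤ ·))
    (C : Nat) (hC : C = xs.countP (fun v => v < PySem.List.pyGetD xs r 0 - k))
    (hCm : C < xs.length) :
    ∀ (fuel l0 : Nat), l0 ≤ C → C - l0 < fuel →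
      pvAWhile xs k r l0 fuel = C := by
  intro fuel
  induction fuel with
  | zero => intro l0 _ h; omega
  | succ fuel ih =>
    intro l0 hl0 hf
    have hl0m : l0 < xs.length := by omega
    have hget : PySem.List.pyGetD xs (l0 : Int) 0 = xs[l0] := pv_get xs l0 hl0m
    have hchar := pv_countP_char xs (PySem.List.pyGetD xs r 0 - k) hs l0 hl0m
    rw [pvAWhile]
    by_cases hcond : PySem.List.pyGetD xs r 0 - PySem.List.pyGetD xs (l0 : Int) 0 > k
    · have hlt : l0 < C := by
        rw [hC]
        apply hchar.mp
        rw [hget] at hcond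
        omega
      rw [if_pos hcond]
      exact ih (l0 + 1) (by omega) (by omega)
    · have hnlt : ¬ l0 < C := by
        intro h
        apply hcond
        have := hchar.mpr (by omega)
        rw [hget]
        omega
      rw [if_neg hcond]
      omega

-- B's binary search lands on the same countP.
theorem pv_bsearch_eq (xs : List Int) (t : Int) (hs : xs.Pairwise (· ≤ ·))
    (C : Nat) (hC : C = xs.countP (fun v => v < t)) :
    ∀ (fuel : Nat) (lo hi : Int), 0 ≤ lo → lo ≤ (C : Int) → (C : Int) ≤ hi →
      hi ≤ (xs.length : Int) → hi - lo < fuel →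
      pvBSearch xs t lo hi fuel = (C : Int) := by
  intro fuel
  induction fuel with
  | zero => intro lo hi _ _ _ _ h; omega
  | succ fuel ih =>
    intro lo hi h0 hloC hChi hhim hf
    rw [pvBSearch]
    by_cases hlh : lo < hi
    · rw [if_pos hlh]
      have hmid := PySem.Int.floordiv_two_mid_bounds (le_of_lt hlh)
      have hmlt : PySem.Int.floordiv (lo + hi) 2 < hi := by
        rw [PySem.Int.floordiv_lt_iff_lt_mul (by omega)]
        omega
      set mid := PySem.Int.floordiv (lo + hi) 2 with hmiddef
      have hmidm : mid.toNat < xs.length := by omega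
      have hget : PySem.List.pyGetD xs mid 0 = xs[mid.toNat] :=
        PySem.List.pyGetD_eq_getElem xs 0 (by omega) (by omega)
      have hchar := pv_countP_char xs t hs mid.toNat hmidm
      by_cases hcond : PySem.List.pyGetD xs mid 0 < t
      · rw [if_pos hcond]
        have : mid.toNat < C := by rw [hC]; exact hchar.mp (by rw [← hget]; exact hcond)
        exact ih (mid + 1) hi (by omega) (by omega) hChi hhim (by omega)
      · rw [if_neg hcond]
        have : ¬ mid.toNat < C := by
          intro h
          exact hcond (by rw [hget]; exact hchar.mpr (by omega))
        exact ih lo mid h0 hloC (by omega) (by omega) (by omega)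
    · rw [if_neg hlh]
      omega

-- Sorted lists are pointwise monotone in the index.
theorem pv_sorted_getElem_mono (xs : List Int) (hs : xs.Pairwise (· ≤ ·))
    (p q : Nat) (hpq : p ≤ q) (hq : q < xs.length) : xs[p] ≤ xs[q] := by
  rcases Nat.lt_or_ge p q with h | h
  · exact (List.pairwise_iff_getElem.mp hs) p q (by omega) hq h
  · have : p = q := by omega
    subst this; exact le_refl _

-- Under Pre_, every window's left boundary count stays inside the list.
theorem pv_count_lt_len (n k : Int) (incomes : List Int)
    (xs : List Int) (hxs : xs = PySem.List.sorted incomes (fun x => x) false)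
    (hpre : Pre_max_families_within_diversity n k incomes)
    (hn : 0 < n) (j : Nat) (hj : (j : Int) < n) :
    xs.countP (fun v => v < PySem.List.pyGetD xs (j : Int) 0 - k) < xs.length := by
  have hperm : xs.Perm incomes := by rw [hxs]; exact PySem.List.sorted_perm incomes (fun x => x) false
  have hlen : xs.length = incomes.length := hperm.length_eq
  have hs : xs.Pairwise (· ≤ ·) := by
    rw [hxs]
    simpa using PySem.List.sorted_pairwise incomes (fun x => x)
  rcases hpre with ⟨hnm, hcnt⟩
  rcases hcnt with h | hcnt
  · omega
  set M := incomes.foldl max (incomes.headD 0) with hM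
  have hjm : j < xs.length := by omega
  have hne : incomes ≠ [] := by
    intro h; subst h; simp at hnm; omega
  -- M ∈ incomes
  have hMmem : M ∈ incomes := by
    rcases pv_foldl_max_mem incomes (incomes.headD 0) with h | h
    · rw [hM, h]
      cases incomes with
      | nil => exact absurd rfl hne
      | cons a l => simp
    · exact h
  have hMxs : M ∈ xs := hperm.mem_iff.mpr hMmem
  -- countP (≤ k + M) = countP (< k + M + 1), and xs[j] ≤ k + M
  have hceq : incomes.countP (fun v => v ≤ k + M) = xs.countP (fun v => v < k + M + 1) := by
    rw [hperm.countP_eq]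
    apply List.countP_congr
    intro a _
    simp only [decide_eq_true_eq]
    omega
  have hjC : j < xs.countP (fun v => v < k + M + 1) := by omega
  have hxj : xs[j] < k + M + 1 := (pv_countP_char xs (k + M + 1) hs j hjm).mpr hjC
  rw [pv_get xs j hjm]
  -- M fails the predicate, so the count is < length
  by_contra hc
  have hall : ∀ v ∈ xs, v < xs[j] - k := by
    have hle : xs.countP (fun v => v < xs[j] - k) ≤ xs.length := List.countP_le_length
    have : xs.countP (fun v => decide (v < xs[j] - k)) = xs.length := by omega
    intro v hv
    have := (List.countP_eq_length).mp this v hv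
    simpa using this
  have := hall M hMxs
  omega

-- The two folds agree, carrying A's running left pointer = previous countP.
theorem pv_fold_eq (n k : Int) (incomes : List Int)
    (xs : List Int) (hxs : xs = PySem.List.sorted incomes (fun x => x) false)
    (hpre : Pre_max_families_within_diversity n k incomes) (hn : 0 < n) :
    ∀ (j : Nat), (j : Int) ≤ n →
      ∃ (L : Nat), L ≤ xs.length ∧
        (∀ (i : Nat), j ≤ i → (i : Int) < n →
          L ≤ xs.countP (fun v => v < PySem.List.pyGetD xs (i : Int) 0 - k)) ∧
        (PySem.List.pyRange 0 (j : Int) 1).foldl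
          (fun (st : Nat × Int) r =>
            let left := pvAWhile xs k r st.1 (xs.length + 1)
            (left, max st.2 (r - (left : Int) + 1))) (0, 0)
        = (L, (PySem.List.pyRange 0 (j : Int) 1).foldl
            (fun best r =>
              let target := PySem.List.pyGetD xs r 0 - k
              let lo := pvBSearch xs target 0 (xs.length : Int) (xs.length + 1)
              if r - lo + 1 > best then r - lo + 1 else best) 0) := by
  have hs : xs.Pairwise (· ≤ ·) := by
    rw [hxs]
    simpa using PySem.List.sorted_pairwise incomes (fun x => x)
  intro j
  induction j with
  | zero =>
    intro _
    refine ⟨0, by omega, fun i _ _ => by omega, ?_⟩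
    simp [PySem.List.pyRange_one_eq_nil (by omega : (0:Int) ≤ 0)]
  | succ j ih =>
    intro hjn
    have hjn' : (j : Int) < n := by push_cast at hjn ⊢; omega
    rcases ih (by omega) with ⟨L, hLm, hLle, hfold⟩
    set Cj := xs.countP (fun v => v < PySem.List.pyGetD xs (j : Int) 0 - k) with hCj
    have hCjm : Cj < xs.length := pv_count_lt_len n k incomes xs hxs hpre hn j hjn'
    have hLCj : L ≤ Cj := hLle j (le_refl j) hjn'
    have hrange : PySem.List.pyRange 0 ((j : Int) + 1) 1
        = PySem.List.pyRange 0 (j : Int) 1 ++ [(j : Int)] :=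
      PySem.List.pyRange_one_succ_right (by omega)
    have hA : pvAWhile xs k (j : Int) L (xs.length + 1) = Cj :=
      pv_aWhile_eq xs k (j : Int) hs Cj hCj hCjm (xs.length + 1) L hLCj (by omega)
    have hB : pvBSearch xs (PySem.List.pyGetD xs (j : Int) 0 - k) 0 (xs.length : Int)
        (xs.length + 1) = (Cj : Int) :=
      pv_bsearch_eq xs _ hs Cj hCj (xs.length + 1) 0 (xs.length : Int)
        (le_refl 0) (by omega) (by omega) (le_refl _) (by omega)
    refine ⟨Cj, by omega, ?_, ?_⟩
    · intro i hji hin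
      have h1 : n ≤ (incomes.length : Int) := hpre.1
      have h2 : xs.length = incomes.length := by
        rw [hxs]; exact PySem.List.length_sorted incomes (fun x => x) false
      have hjim : j < xs.length := by omega
      have him : i < xs.length := by omega
      apply List.countP_mono_left
      intro a _
      simp only [decide_eq_true_eq]
      intro h
      have hgj : PySem.List.pyGetD xs (j : Int) 0 = xs[j] := pv_get xs j hjim
      have hgi : PySem.List.pyGetD xs (i : Int) 0 = xs[i] := pv_get xs i him
      have := pv_sorted_getElem_mono xs hs j i (by omega) him
      rw [hgj] at h
      rw [hgi]
      omega
    · have hcast : ((j : Int) + 1) = ((j + 1 : Nat) : Int) := by push_cast; ring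
      rw [← hcast, hrange, List.foldl_append, List.foldl_append, hfold]
      simp only [List.foldl_cons, List.foldl_nil, hA, hB]
      congr 1
      omega

-- ===== VERDICT (by name: the statement is the Claim_ definition above) =====
theorem max_families_within_diversity_spec : Claim_equal_max_families_within_diversity := by
  intro n k incomes _ hpre
  unfold Spec_max_families_within_diversity
  unfold max_families_within_diversity max_families_within_diversity_alt
  rcases Int.lt_or_le 0 n with hn | hn
  · rcases pv_fold_eq n k incomes _ rfl hpre hn n.toNat (by omega) with ⟨L, _, _, hfold⟩
    have : ((n.toNat : Nat) : Int) = n := by omega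
    rw [this] at hfold
    simp only [hfold]
  · rw [PySem.List.pyRange_one_eq_nil hn]
    simp
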